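-- pv_equiv track=rewrite | github.com/AbbiTato/strandedcurrent-2- | strandedBattle.py | makeDemandMeter
-- ===== SOURCE A (Python) =====
-- def makeDemandMeter(demandPosit, lenience, demand):
--     totalStr = "Progress: ["
--     for i in range(lenience, demand):
--         if i == (demandPosit):
--             totalStr+="I"
--         else:
--             totalStr+=" "
--     totalStr +="]"
--     if demandPosit > demand:
--         return "[NEGOTIATION SUCCESS!!]"
--     else:
--         return totalStr
-- ===== SOURCE B (Python) =====
-- def makeDemandMeter(demandPosit, lenience, demand):
--     if demandPosit > demand:
--         return "[NEGOTIATION SUCCESS!!]"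
--     if lenience <= demandPosit < demand:
--         return ("Progress: [" + " " * (demandPosit - lenience) + "I"
--                 + " " * (demand - 1 - demandPosit) + "]")
--     return "Progress: [" + " " * (demand - lenience) + "]"
-- ===== Notes on version B (the rewrite author's own statement) =====
-- stated objective: simpler
-- what changed: Replaced the slot-by-slot loop that appends one character per range position with direct arithmetic: the marker position and the two space runs are computed in closed form via string multiplication.
import Mathlib
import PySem

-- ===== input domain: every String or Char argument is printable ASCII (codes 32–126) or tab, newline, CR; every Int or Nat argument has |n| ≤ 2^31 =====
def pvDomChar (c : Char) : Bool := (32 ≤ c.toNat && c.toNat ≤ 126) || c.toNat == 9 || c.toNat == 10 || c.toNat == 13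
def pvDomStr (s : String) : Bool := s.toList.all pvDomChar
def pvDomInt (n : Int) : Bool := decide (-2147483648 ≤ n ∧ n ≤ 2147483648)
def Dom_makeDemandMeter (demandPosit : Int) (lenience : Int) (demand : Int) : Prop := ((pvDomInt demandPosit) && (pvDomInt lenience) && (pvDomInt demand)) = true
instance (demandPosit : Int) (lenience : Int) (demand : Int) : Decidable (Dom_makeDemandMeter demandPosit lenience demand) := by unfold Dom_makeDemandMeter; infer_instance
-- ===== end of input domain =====

-- B replaces A's slot-by-slot character-appending loop with a closed-form arithmetic
-- construction of the meter string (objective: simpler).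


-- ===== PORT A =====
def makeDemandMeter (demandPosit : Int) (lenience : Int) (demand : Int) : String :=
  let totalStr : String :=
    (PySem.List.pyRange lenience demand 1).foldl
      (fun s i => if i == demandPosit then s ++ "I" else s ++ " ") "Progress: ["
  let totalStr := totalStr ++ "]"
  if demandPosit > demand then "[NEGOTIATION SUCCESS!!]" else totalStr

-- ===== PORT B =====
def makeDemandMeter_alt (demandPosit : Int) (lenience : Int) (demand : Int) : String :=
  if demandPosit > demand then "[NEGOTIATION SUCCESS!!]"
  else if lenience ≤ demandPosit ∧ demandPosit < demand then
    "Progress: [" ++ String.ofList (List.replicate (demandPosit - lenience).toNat ' ')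
      ++ "I" ++ String.ofList (List.replicate (demand - 1 - demandPosit).toNat ' ') ++ "]"
  else
    "Progress: [" ++ String.ofList (List.replicate (demand - lenience).toNat ' ') ++ "]"

-- ===== PRECONDITION & SPEC =====
def Spec_makeDemandMeter (demandPosit : Int) (lenience : Int) (demand : Int) (out : String) : Prop := out = makeDemandMeter_alt demandPosit lenience demand
instance (demandPosit : Int) (lenience : Int) (demand : Int) (out : String) : Decidable (Spec_makeDemandMeter demandPosit lenience demand out) := by unfold Spec_makeDemandMeter; infer_instance

-- ===== CLAIM (what is proved, stated in full; the proofs are below) =====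
def Claim_equal_makeDemandMeter : Prop := ∀ (demandPosit : Int) (lenience : Int) (demand : Int), Dom_makeDemandMeter demandPosit lenience demand → Spec_makeDemandMeter demandPosit lenience demand (makeDemandMeter demandPosit lenience demand)

-- ===== LEMMAS AND PROOFS =====

-- The character-appending fold equals appending the map of the range to the accumulator.
theorem foldl_char_append (dp : Int) (L : List Int) (s0 : String) :
    L.foldl (fun s i => if i == dp then s ++ "I" else s ++ " ") s0
      = s0 ++ String.ofList (L.map (fun i => if i = dp then 'I' else ' ')) := by
  induction L generalizing s0 with
  | nil => simp
  | cons x xs ih =>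
    simp only [List.foldl_cons, List.map_cons, ih]
    by_cases h : x = dp <;>
      simp [h, String.ext_iff]

theorem map_range_no_marker (dp a b : Int) (h : ¬ (a ≤ dp ∧ dp < b)) :
    (PySem.List.pyRange a b 1).map (fun i => if i = dp then 'I' else ' ')
      = List.replicate (b - a).toNat ' ' := by
  rw [List.eq_replicate_iff]
  constructor
  · simp [PySem.List.length_pyRange_one]
  · intro c hc
    obtain ⟨i, hi, rfl⟩ := List.mem_map.mp hc
    rw [PySem.List.mem_pyRange_one] at hi
    have : i ≠ dp := by rintro rfl; exact h hi
    simp [this]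

theorem map_range_marker (dp a b : Int) (h1 : a ≤ dp) (h2 : dp < b) :
    (PySem.List.pyRange a b 1).map (fun i => if i = dp then 'I' else ' ')
      = List.replicate (dp - a).toNat ' ' ++ 'I' :: List.replicate (b - 1 - dp).toNat ' ' := by
  rw [PySem.List.pyRange_one_append a dp b h1 (le_of_lt h2),
      PySem.List.pyRange_one_cons h2]
  rw [List.map_append, List.map_cons]
  rw [map_range_no_marker dp a dp (by omega), map_range_no_marker dp (dp+1) b (by omega)]
  simp
  congr 1
  omega

-- ===== VERDICT (by name: the statement is the Claim_ definition above) =====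
theorem makeDemandMeter_spec : Claim_equal_makeDemandMeter := by
  intro dp l d _
  unfold Spec_makeDemandMeter makeDemandMeter makeDemandMeter_alt
  simp only [foldl_char_append]
  by_cases hgt : dp > d
  · simp [hgt]
  · simp only [if_neg hgt]
    by_cases hin : l ≤ dp ∧ dp < d
    · rw [if_pos hin, map_range_marker dp l d hin.1 hin.2]
      simp [String.ext_iff]
    · rw [if_neg hin, map_range_no_marker dp l d hin]
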